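-- pv_equiv track=rewrite | github.com/nkukarl/lintcode | Q437 Copy Books.py | copyBooks_TLE
-- ===== SOURCE A (Python) =====
-- def copyBooks_TLE(pages, m):
-- 	n = len(pages)
--
-- 	pagesSum = [[0] * n for _ in range(n)]
--
-- 	for i in range(n):
-- 		for j in range(i, n):
-- 			pagesSum[i][j] = pagesSum[i][j - 1] + pages[j]
--
-- 	dp = [0] * (n + 1)
-- 	for j in range(1, n + 1):
-- 		dp[j] = dp[j - 1] + pages[j - 1]
-- 	for i in range(1, m):
-- 		tmp = []
-- 		for j in range(n + 1):
-- 			if j < i: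
-- 				tmp.append(dp[j])
-- 			else:
-- 				val = 2 ** 31
-- 				for k in range(j):
-- 					cur = max(dp[k], pagesSum[k][j - 1])
-- 					val = min(val, cur)
-- 				tmp.append(val)
-- 		dp = tmp[:]
-- 	return dp[-1]
-- ===== SOURCE B (Python) =====
-- def copyBooks_TLE(pages, m):
--     # Top-down memoized recursion on (copiers, books) over prefix sums:
--     # best(i, j) = minimal max pages when the first j books go to i copiers.
--     # The copier count is capped at n + 1: extra copiers never change the value.
--     n = len(pages)
--     pre = [0]
--     for p in pages:
--         pre.append(pre[-1] + p)
--     memo = {}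
--     def best(i, j):
--         if i <= 1 or j == 0:
--             return pre[j]
--         if (i, j) in memo:
--             return memo[(i, j)]
--         val = 2 ** 31
--         for k in range(j):
--             val = min(val, max(best(i - 1, k), pre[j] - pre[k]))
--         memo[(i, j)] = val
--         return val
--     return best(min(m, n + 1), n)
-- ===== Notes on version B (the rewrite author's own statement) =====
-- stated objective: alternative
-- what changed: B replaces A's bottom-up layered DP with its O(n^2) pagesSum table and m-1 full row rebuilds by a top-down memoized recursion best(i, j) over prefix sums that computes only the reachable (copiers, books) states, with the copier count capped at n+1 because further copiers cannot change the optimum.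
import Mathlib
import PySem

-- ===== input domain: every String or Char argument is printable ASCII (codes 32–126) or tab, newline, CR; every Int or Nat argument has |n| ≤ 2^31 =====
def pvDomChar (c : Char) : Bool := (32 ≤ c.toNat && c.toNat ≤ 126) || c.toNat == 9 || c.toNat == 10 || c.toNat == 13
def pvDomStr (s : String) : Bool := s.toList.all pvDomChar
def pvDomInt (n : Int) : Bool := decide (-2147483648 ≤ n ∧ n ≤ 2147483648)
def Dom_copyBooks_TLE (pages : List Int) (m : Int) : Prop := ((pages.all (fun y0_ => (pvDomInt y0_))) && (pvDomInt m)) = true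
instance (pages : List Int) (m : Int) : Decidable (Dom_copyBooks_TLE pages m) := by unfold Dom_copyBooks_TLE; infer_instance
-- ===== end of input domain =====

-- B replaces A's bottom-up layered DP (O(n^2) pagesSum table, m-1 full row rebuilds)
-- by a top-down memoized recursion over prefix sums with the copier count capped at
-- n+1 (further copiers never change the optimum); objective: alternative algorithm.

-- ===== PORT A =====
-- pagesSum = [[0]*n for _ in range(n)]; pagesSum[i][j] = pagesSum[i][j-1] + pages[j]
-- (the j-1 read is Python negative indexing when i = j = 0; pyGetD is exact there)
def pvA_pagesSum (pages : List Int) : List (List Int) :=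
  let n : Int := PySem.List.len pages
  (PySem.List.pyRange 0 n 1).foldl (fun ps i =>
    (PySem.List.pyRange i n 1).foldl (fun ps j =>
      PySem.List.pySetD ps i
        (PySem.List.pySetD (PySem.List.pyGetD ps i []) j
          (PySem.List.pyGetD (PySem.List.pyGetD ps i []) (j-1) 0 + PySem.List.pyGetD pages j 0))) ps)
    ((PySem.List.pyRange 0 n 1).map (fun _ => PySem.List.pyRepeat [(0:Int)] n))

-- dp = [0]*(n+1); dp[j] = dp[j-1] + pages[j-1]
def pvA_dpInit (pages : List Int) : List Int :=
  let n : Int := PySem.List.len pages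
  (PySem.List.pyRange 1 (n+1) 1).foldl (fun dp j =>
    PySem.List.pySetD dp j (PySem.List.pyGetD dp (j-1) 0 + PySem.List.pyGetD pages (j-1) 0))
    (PySem.List.pyRepeat [(0:Int)] (n+1))

-- one iteration of 'for i in range(1, m)': builds tmp and returns it (tmp[:] is a copy)
def pvA_step (pages : List Int) (ps : List (List Int)) (dp : List Int) (i : Int) : List Int :=
  let n : Int := PySem.List.len pages
  (PySem.List.pyRange 0 (n+1) 1).foldl (fun tmp j =>
    if j < i then tmp ++ [PySem.List.pyGetD dp j 0]
    else tmp ++ [(PySem.List.pyRange 0 j 1).foldl (fun val k =>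
      min val (max (PySem.List.pyGetD dp k 0)
        (PySem.List.pyGetD (PySem.List.pyGetD ps k []) (j-1) 0))) (2^31)]) []

def copyBooks_TLE (pages : List Int) (m : Int) : Int :=
  PySem.List.pyGetD
    ((PySem.List.pyRange 1 m 1).foldl (pvA_step pages (pvA_pagesSum pages)) (pvA_dpInit pages))
    (-1) 0

-- ===== PORT B =====
-- pre = [0]; for p in pages: pre.append(pre[-1] + p)
def pvBpre (pages : List Int) : List Int :=
  pages.foldl (fun pr p => pr ++ [PySem.List.pyGetD pr (-1) 0 + p]) [(0:Int)]

-- the memoized recursion best(i, j); the memo dict is threaded through explicitly.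
-- pvBloop is the 'for k in range(j)' loop (it receives i-1 once, as ip).
mutual
def pvBbest (pre : List Int) (i j : Int) (memo : PySem.Dict (Int × Int) Int) :
    Int × PySem.Dict (Int × Int) Int :=
  if h : i ≤ 1 ∨ j = 0 then (PySem.List.pyGetD pre j 0, memo)
  else if PySem.Dict.contains memo (i, j) = true then
    (PySem.Dict.getD memo (i, j) 0, memo)
  else
    let r := pvBloop pre (i - 1) j (PySem.List.pyRange 0 j 1) (2 ^ 31) memo
    (r.1, PySem.Dict.insert r.2 (i, j) r.1)
  termination_by (2 * i.toNat + 1, 0)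
  decreasing_by
    simp_wf
    apply Prod.Lex.left
    omega
def pvBloop (pre : List Int) (ip j : Int) (ks : List Int) (val : Int)
    (memo : PySem.Dict (Int × Int) Int) : Int × PySem.Dict (Int × Int) Int :=
  match ks with
  | [] => (val, memo)
  | k :: ks' =>
    let r := pvBbest pre ip k memo
    pvBloop pre ip j ks'
      (min val (max r.1 (PySem.List.pyGetD pre j 0 - PySem.List.pyGetD pre k 0))) r.2
  termination_by (2 * ip.toNat + 2, ks.length)
  decreasing_by
    · simp_wf
      apply Prod.Lex.left
      omega
    · simp_wf
      apply Prod.Lex.right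
      simp
end

def copyBooks_TLE_alt (pages : List Int) (m : Int) : Int :=
  let n : Int := PySem.List.len pages
  let pre := pvBpre pages
  (pvBbest pre (min m (n + 1)) n PySem.Dict.empty).1

-- ===== PRECONDITION & SPEC =====
def Spec_copyBooks_TLE (pages : List Int) (m : Int) (out : Int) : Prop := out = copyBooks_TLE_alt pages m
instance (pages : List Int) (m : Int) (out : Int) : Decidable (Spec_copyBooks_TLE pages m out) := by unfold Spec_copyBooks_TLE; infer_instance

-- ===== CLAIM (what is proved, stated in full; the proofs are below) =====
def Claim_equal_copyBooks_TLE : Prop := ∀ (pages : List Int) (m : Int), Dom_copyBooks_TLE pages m → Spec_copyBooks_TLE pages m (copyBooks_TLE pages m)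

-- ===== LEMMAS AND PROOFS =====

def pvS (pages : List Int) (t : Nat) : Int := (pages.take t).sum

lemma pvS_succ (pages : List Int) (t : Nat) (h : t < pages.length) :
    pvS pages (t+1) = pvS pages t + pages.getD t 0 := by
  unfold pvS
  rw [List.take_add_one, List.sum_append]
  simp [List.getD, List.getElem?_eq_getElem h]

-- the mathematical value of the DP: pvFlev s j = best value for the first j books
-- with s+1 copiers (s = 0 means one copier: the plain prefix sum)
def pvFlev (pages : List Int) : Nat → Nat → Int
  | 0, j => pvS pages j
  | s+1, j =>
    if j = 0 then 0
    else (List.range j).foldl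
      (fun v k => min v (max (pvFlev pages s k) (pvS pages j - pvS pages k))) (2^31)

lemma pvFlev_zero_books (pages : List Int) (s : Nat) : pvFlev pages s 0 = 0 := by
  cases s <;> simp [pvFlev, pvS]

lemma pvFlev_succ (pages : List Int) (s j : Nat) (hj : j ≠ 0) :
    pvFlev pages (s+1) j = (List.range j).foldl
      (fun v k => min v (max (pvFlev pages s k) (pvS pages j - pvS pages k))) (2^31) := by
  rw [pvFlev, if_neg hj]

lemma pvFlev_stab1 (pages : List Int) :
    ∀ i k, k ≤ i → pvFlev pages (i+1) k = pvFlev pages i k := by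
  intro i
  induction i with
  | zero =>
    intro k hk
    interval_cases k
    simp [pvFlev_zero_books, pvFlev, pvS]
  | succ i ih =>
    intro k hk
    by_cases hk0 : k = 0
    · simp [hk0, pvFlev_zero_books]
    · rw [pvFlev_succ pages (i+1) k hk0, pvFlev_succ pages i k hk0]
      apply PySem.List.foldl_congr_mem
      intro acc t ht
      have htk : t < k := List.mem_range.mp ht
      rw [ih t (by omega)]

lemma pvFlev_stab (pages : List Int) (i j : Nat) (h : j ≤ i) :
    pvFlev pages i j = pvFlev pages j j := by
  obtain ⟨d, rfl⟩ : ∃ d, i = j + d := ⟨i - j, by omega⟩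
  clear h
  induction d with
  | zero => rfl
  | succ d ih => rw [show j + (d+1) = (j+d) + 1 by omega, pvFlev_stab1 pages (j+d) j (by omega), ih]

def pvRowStep (pages : List Int) (row : List Int) (j : Int) : List Int :=
  PySem.List.pySetD row j (PySem.List.pyGetD row (j-1) 0 + PySem.List.pyGetD pages j 0)

lemma pv_factor (pages : List Int) (js : List Int) (i : Nat) :
    ∀ ps : List (List Int), i < ps.length →
    js.foldl (fun ps j =>
      PySem.List.pySetD ps (i:Int)
        (PySem.List.pySetD (PySem.List.pyGetD ps (i:Int) []) j
          (PySem.List.pyGetD (PySem.List.pyGetD ps (i:Int) []) (j-1) 0 + PySem.List.pyGetD pages j 0))) ps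
    = ps.set i (js.foldl (pvRowStep pages) (ps.getD i [])) := by
  induction js with
  | nil => intro ps h; simp [List.getD, List.getElem?_eq_getElem h]
  | cons j js ih =>
    intro ps h
    have h1 : PySem.List.pyGetD ps (i:Int) [] = ps.getD i [] := by
      simp
    have h2 : ∀ r : List Int, PySem.List.pySetD ps (i:Int) r = ps.set i r := by
      intro r; simp
    simp only [List.foldl_cons, h1, h2]
    rw [show (PySem.List.pySetD (ps.getD i []) j (PySem.List.pyGetD (ps.getD i []) (j - 1) 0 + PySem.List.pyGetD pages j 0)) = pvRowStep pages (ps.getD i []) j from rfl]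
    rw [ih (ps.set i (pvRowStep pages (ps.getD i []) j)) (by simpa using h)]
    simp [List.set_set, List.getD, h, pvRowStep]

lemma pv_set_getD' {α : Type} (row : List α) (c t : Nat) (hc : c < row.length) (v d : α) :
    (row.set c v).getD t d = if t = c then v else row.getD t d := by
  simp only [List.getD, List.getElem?_set]
  by_cases h : c = t
  · subst h; simp [hc]
  · simp [h, Ne.symm h]

lemma pv_set_getD (row : List Int) (c t : Nat) (hc : c < row.length) (v : Int) :
    (row.set c v).getD t 0 = if t = c then v else row.getD t 0 :=
  pv_set_getD' row c t hc v 0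

lemma pv_rowinv (pages : List Int) (k : Nat) :
    ∀ (d c : Nat), c + d = pages.length → k ≤ c → ∀ row : List Int, row.length = pages.length →
    (∀ t, t < pages.length → row.getD t 0 = if k ≤ t ∧ t < c then pvS pages (t+1) - pvS pages k else 0) →
    ∀ t, t < pages.length → k ≤ t →
    (((PySem.List.pyRange (c:Int) (pages.length:Int) 1).foldl (pvRowStep pages) row).getD t 0)
      = pvS pages (t+1) - pvS pages k := by
  intro d
  induction d with
  | zero =>
    intro c hc hkc row hlen hinv t ht hkt
    have : c = pages.length := by omega
    subst this
    rw [PySem.List.pyRange_one_eq_nil (by omega)]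
    simp only [List.foldl_nil]
    rw [hinv t ht, if_pos ⟨hkt, ht⟩]
  | succ d ih =>
    intro c hc hkc row hlen hinv t ht hkt
    have hcN : c < pages.length := by omega
    rw [PySem.List.pyRange_one_cons (by exact_mod_cast hcN)]
    simp only [List.foldl_cons]
    have hread : PySem.List.pyGetD row ((c:Int)-1) 0 = pvS pages c - pvS pages k := by
      by_cases hc0 : c = 0
      · subst hc0
        have hne : row ≠ [] := by
          intro h; rw [h] at hlen; simp at hlen; omega
        rw [show ((0:Nat):Int) - 1 = -1 by ring, PySem.List.pyGetD_neg_one row 0 hne]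
        have hk0 : k = 0 := by omega
        subst hk0
        have := hinv (pages.length - 1) (by omega)
        rw [List.getLast_eq_getElem]
        simp only [List.getD, hlen] at this ⊢
        rw [List.getElem?_eq_getElem (by omega)] at this
        simp only [Option.getD_some] at this
        rw [this]
        simp
      · have hc1 : ((c:Int) - 1) = ((c - 1 : Nat) : Int) := by omega
        rw [hc1, PySem.List.pyGetD_natCast]
        rw [hinv (c-1) (by omega)]
        by_cases hkc1 : k ≤ c - 1
        · rw [if_pos ⟨hkc1, by omega⟩, Nat.sub_add_cancel (by omega : 1 ≤ c)]
        · have : k = c := by omega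
          subst this
          rw [if_neg (by omega)]
          ring
    have hstep : pvRowStep pages row (c:Int)
        = row.set c (pvS pages (c+1) - pvS pages k) := by
      unfold pvRowStep
      rw [hread]
      simp only [PySem.List.pySetD_natCast, PySem.List.pyGetD_natCast]
      rw [pvS_succ pages c hcN]
      congr 1
      ring
    rw [hstep]
    have : ((c:Int) + 1) = (((c+1 : Nat)):Int) := by push_cast; ring
    rw [this]
    apply ih (c+1) (by omega) (by omega) _ (by simp [hlen]) _ t ht hkt
    intro t' ht'
    rw [pv_set_getD row c t' (by omega)]
    by_cases h1 : t' = c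
    · subst h1
      rw [if_pos rfl, if_pos ⟨hkc, by omega⟩]
    · rw [if_neg h1, hinv t' ht']
      have hiff : (k ≤ t' ∧ t' < c) ↔ (k ≤ t' ∧ t' < c+1) := by omega
      rw [if_congr hiff rfl rfl]

def pvRowF (pages : List Int) (k : Nat) : List Int :=
  (PySem.List.pyRange (k:Int) (pages.length:Int) 1).foldl (pvRowStep pages)
    (List.replicate pages.length (0:Int))

lemma pv_outer (pages : List Int) :
    ∀ (d a : Nat), a + d = pages.length → ∀ ps : List (List Int), ps.length = pages.length →
    (∀ t, a ≤ t → t < pages.length → ps.getD t [] = List.replicate pages.length (0:Int)) →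
    ∀ k, k < pages.length →
    ((PySem.List.pyRange (a:Int) (pages.length:Int) 1).foldl (fun ps i =>
      (PySem.List.pyRange i (pages.length:Int) 1).foldl (fun ps j =>
        PySem.List.pySetD ps i
          (PySem.List.pySetD (PySem.List.pyGetD ps i []) j
            (PySem.List.pyGetD (PySem.List.pyGetD ps i []) (j-1) 0 + PySem.List.pyGetD pages j 0))) ps) ps).getD k []
    = if k < a then ps.getD k [] else pvRowF pages k := by
  intro d
  induction d with
  | zero =>
    intro a ha ps hlen hinv k hk
    rw [PySem.List.pyRange_one_eq_nil (by omega)]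
    simp only [List.foldl_nil]
    rw [if_pos (by omega)]
  | succ d ih =>
    intro a ha ps hlen hinv k hk
    have haN : a < pages.length := by omega
    rw [PySem.List.pyRange_one_cons (by exact_mod_cast haN)]
    simp only [List.foldl_cons]
    rw [pv_factor pages _ a ps (by omega)]
    rw [hinv a (by omega) haN]
    rw [show List.foldl (pvRowStep pages) (List.replicate pages.length (0:Int)) (PySem.List.pyRange (a:Int) (pages.length:Int) 1) = pvRowF pages a from rfl]
    have hset : (ps.set a (pvRowF pages a)).length = pages.length := by simp [hlen]
    rw [show ((a:Int) + 1) = (((a+1:Nat)):Int) by push_cast; ring]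
    rw [ih (a+1) (by omega) _ hset ?_ k hk]
    · by_cases h1 : k < a
      · rw [if_pos (by omega), if_pos h1, pv_set_getD' ps a k (by omega), if_neg (by omega)]
      · by_cases h2 : k = a
        · subst h2
          rw [if_pos (by omega), if_neg (by omega), pv_set_getD' ps k k (by omega), if_pos rfl]
        · rw [if_neg (by omega), if_neg h1]
    · intro t h1 h2
      rw [pv_set_getD' ps a t (by omega), if_neg (by omega)]
      exact hinv t (by omega) h2

lemma pv_rowval (pages : List Int) (k : Nat) (t : Nat) (hkt : k ≤ t) (ht : t < pages.length) :
    (pvRowF pages k).getD t 0 = pvS pages (t+1) - pvS pages k := by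
  unfold pvRowF
  apply pv_rowinv pages k (pages.length - k) k (by omega) (by omega) _ (by simp) _ t ht hkt
  intro t' ht'
  rw [List.getD_replicate _ ht', if_neg (by omega)]

lemma pv_pagesSum_getD (pages : List Int) (k t : Nat) (hk : k ≤ t) (ht : t < pages.length) :
    ((pvA_pagesSum pages).getD k []).getD t 0 = pvS pages (t+1) - pvS pages k := by
  unfold pvA_pagesSum
  simp only [PySem.List.len_eq]
  have hT0 : ((PySem.List.pyRange 0 (pages.length:Int) 1).map (fun _ => PySem.List.pyRepeat [(0:Int)] (pages.length:Int)))
      = List.replicate pages.length (List.replicate pages.length (0:Int)) := by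
    rw [PySem.List.pyRepeat_singleton, List.map_const', PySem.List.length_pyRange_one]
    simp
  rw [hT0]
  have hmain := pv_outer pages pages.length 0 (by omega)
    (List.replicate pages.length (List.replicate pages.length (0:Int))) (by simp)
    (fun t' _ ht' => List.getD_replicate _ ht') k (by omega)
  simp only [Nat.cast_zero] at hmain
  rw [hmain, if_neg (by omega)]
  exact pv_rowval pages k t hk ht

def pvF (pages dp : List Int) (j k : Nat) : Int :=
  max (dp.getD k 0) (pvS pages j - pvS pages k)

def pvBest (pages dp : List Int) (j : Nat) : Int :=
  (List.range j).foldl (fun v k => min v (pvF pages dp j k)) (2^31)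

lemma pv_A_inner (pages dp : List Int) (j : Nat) (h1 : 1 ≤ j) (h2 : j ≤ pages.length) :
    (PySem.List.pyRange 0 (j:Int) 1).foldl (fun val k =>
      min val (max (PySem.List.pyGetD dp k 0)
        (PySem.List.pyGetD (PySem.List.pyGetD (pvA_pagesSum pages) k []) ((j:Int)-1) 0))) (2^31)
    = pvBest pages dp j := by
  rw [PySem.List.pyRange_zero_nat, List.foldl_map]
  unfold pvBest
  apply PySem.List.foldl_congr_mem
  intro acc k hk
  have hkj : k < j := List.mem_range.mp hk
  have hj1 : ((j:Int)) - 1 = ((j-1:Nat):Int) := by omega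
  rw [hj1]
  simp only [PySem.List.pyGetD_natCast]
  rw [pv_pagesSum_getD pages k (j-1) (by omega) (by omega)]
  rw [show j - 1 + 1 = j by omega]
  rfl

def pvG (pages dp : List Int) (i : Int) : List Int :=
  (List.range (pages.length + 1)).map
    (fun (j : Nat) => if (j : Int) < i then dp.getD j 0 else pvBest pages dp j)

lemma pv_A_char (pages : List Int) (dp : List Int) (i : Int) (h1 : 1 ≤ i) :
    pvA_step pages (pvA_pagesSum pages) dp i = pvG pages dp i := by
  unfold pvA_step
  simp only [PySem.List.len_eq]
  rw [PySem.List.foldl_congr_mem (PySem.List.pyRange 0 ((pages.length:Int)+1) 1) _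
      (fun tmp j =>
      tmp ++ [if j < i then PySem.List.pyGetD dp j 0
        else (PySem.List.pyRange 0 j 1).foldl (fun val k =>
          min val (max (PySem.List.pyGetD dp k 0)
            (PySem.List.pyGetD (PySem.List.pyGetD (pvA_pagesSum pages) k []) (j-1) 0))) (2^31)]) []
      (by intro acc x _; simp only []; split_ifs <;> rfl)]
  rw [PySem.List.foldl_append_singleton_eq_map]
  rw [show ((pages.length:Int) + 1) = (((pages.length + 1 : Nat)):Int) by push_cast; ring]
  rw [PySem.List.pyRange_zero_nat, List.map_map]
  unfold pvG
  apply List.map_congr_left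
  intro j hj
  have hjN : j < pages.length + 1 := List.mem_range.mp hj
  simp only [Function.comp_apply]
  by_cases hji : (j:Int) < i
  · rw [if_pos hji, if_pos hji, PySem.List.pyGetD_natCast]
  · rw [if_neg hji, if_neg hji]
    exact pv_A_inner pages dp j (by omega) (by omega)

-- the state of A's dp list after r rounds, expressed through pvFlev
def pvDpAt (pages : List Int) (r : Nat) : List Int :=
  (List.range (pages.length + 1)).map (fun j => pvFlev pages (min r j) j)

lemma pv_map_getD {α : Type} [Inhabited α] (N t : Nat) (f : Nat → α) (d : α) (h : t < N) :
    ((List.range N).map f).getD t d = f t := by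
  simp [List.getD, List.getElem?_map, List.getElem?_range, h]

lemma pv_list_eq_map (l : List Int) (N : Nat) (f : Nat → Int)
    (hl : l.length = N) (h : ∀ t, t < N → l.getD t 0 = f t) :
    l = (List.range N).map f := by
  apply List.ext_getElem
  · simp [hl]
  · intro t h1 h2
    have := h t (by omega)
    simp only [List.getD] at this
    rw [List.getElem?_eq_getElem (by omega : t < l.length)] at this
    simp only [Option.getD_some] at this
    simp [this]

lemma pv_dpInit_inv (pages : List Int) :
    ∀ (d c : Nat), c + d = pages.length + 1 → 1 ≤ c → ∀ dp : List Int, dp.length = pages.length + 1 →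
    (∀ t, t < pages.length + 1 → dp.getD t 0 = if t < c then pvS pages t else 0) →
    ∀ t, t < pages.length + 1 →
    (((PySem.List.pyRange (c:Int) ((pages.length:Int)+1) 1).foldl (fun dp j =>
      PySem.List.pySetD dp j (PySem.List.pyGetD dp (j-1) 0 + PySem.List.pyGetD pages (j-1) 0)) dp).getD t 0)
    = pvS pages t := by
  intro d
  induction d with
  | zero =>
    intro c hc hc1 dp hlen hinv t ht
    rw [PySem.List.pyRange_one_eq_nil (by omega)]
    simp only [List.foldl_nil]
    rw [hinv t ht, if_pos (by omega)]
  | succ d ih =>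
    intro c hc hc1 dp hlen hinv t ht
    have hcN : c < pages.length + 1 := by omega
    rw [show ((pages.length:Int) + 1) = (((pages.length + 1 : Nat)):Int) by push_cast; ring]
    rw [PySem.List.pyRange_one_cons (by exact_mod_cast hcN)]
    simp only [List.foldl_cons]
    have hc1' : ((c:Int) - 1) = ((c - 1 : Nat) : Int) := by omega
    have hstep : PySem.List.pySetD dp (c:Int)
        (PySem.List.pyGetD dp ((c:Int)-1) 0 + PySem.List.pyGetD pages ((c:Int)-1) 0)
        = dp.set c (pvS pages c) := by
      rw [hc1']
      simp only [PySem.List.pySetD_natCast, PySem.List.pyGetD_natCast]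
      rw [hinv (c-1) (by omega), if_pos (by omega)]
      rw [show c = (c-1) + 1 by omega, pvS_succ pages (c-1) (by omega)]
      rw [show c - 1 + 1 - 1 = c - 1 by omega]
    rw [hstep]
    rw [show ((c:Int) + 1) = (((c+1 : Nat)):Int) by push_cast; ring]
    rw [show (((pages.length + 1 : Nat)):Int) = (pages.length:Int) + 1 by push_cast; ring]
    apply ih (c+1) (by omega) (by omega) _ (by simp [hlen]) _ t ht
    intro t' ht'
    rw [pv_set_getD dp c t' (by omega)]
    by_cases h1 : t' = c
    · subst h1; rw [if_pos rfl, if_pos (by omega)]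
    · rw [if_neg h1, hinv t' ht']
      have hiff : (t' < c) ↔ (t' < c+1) := by omega
      rw [if_congr hiff rfl rfl]

lemma pv_dpInit_len_aux (pages : List Int) (js : List Int) :
    ∀ dp : List Int,
      (js.foldl (fun dp j =>
        PySem.List.pySetD dp j (PySem.List.pyGetD dp (j-1) 0 + PySem.List.pyGetD pages (j-1) 0)) dp).length
      = dp.length := by
  induction js with
  | nil => intro dp; rfl
  | cons j js ih => intro dp; simp only [List.foldl_cons]; rw [ih, PySem.List.length_pySetD]

lemma pv_dpInit_eq (pages : List Int) : pvA_dpInit pages = pvDpAt pages 0 := by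
  have hval : ∀ t, t < pages.length + 1 → (pvA_dpInit pages).getD t 0 = pvS pages t := by
    intro t ht
    unfold pvA_dpInit
    simp only [PySem.List.len_eq]
    have hrep : PySem.List.pyRepeat [(0:Int)] ((pages.length:Int) + 1)
        = List.replicate (pages.length + 1) (0:Int) := by
      rw [PySem.List.pyRepeat_singleton]
      have h1 : ((pages.length:Int) + 1).toNat = pages.length + 1 := by omega
      rw [h1]
    rw [hrep]
    have key := pv_dpInit_inv pages pages.length 1 (by omega) (by omega)
      (List.replicate (pages.length + 1) (0:Int)) (by simp)
      (fun t' ht' => by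
        rw [List.getD_replicate _ ht']
        by_cases h : t' < 1
        · rw [if_pos h]
          have ht0 : t' = 0 := by omega
          subst ht0
          simp [pvS]
        · rw [if_neg h]) t ht
    simp only [Nat.cast_one] at key
    exact key
  have hlen : (pvA_dpInit pages).length = pages.length + 1 := by
    unfold pvA_dpInit
    simp only [PySem.List.len_eq]
    rw [pv_dpInit_len_aux, PySem.List.pyRepeat_singleton, List.length_replicate]
    omega
  unfold pvDpAt
  apply pv_list_eq_map _ _ _ hlen
  intro t ht
  rw [hval t ht]
  simp [pvFlev]

lemma pv_step_dpAt (pages : List Int) (r : Nat) :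
    pvG pages (pvDpAt pages r) ((r:Int) + 1) = pvDpAt pages (r+1) := by
  unfold pvG pvDpAt
  apply List.map_congr_left
  intro j hj
  have hjN : j < pages.length + 1 := List.mem_range.mp hj
  by_cases hjr : (j:Int) < (r:Int) + 1
  · rw [if_pos hjr]
    have hjr' : j ≤ r := by exact_mod_cast (by omega : (j:Int) ≤ (r:Int))
    rw [pv_map_getD _ j _ _ hjN]
    rw [show min r j = j by omega, show min (r+1) j = j by omega]
  · rw [if_neg hjr]
    have hjr' : r + 1 ≤ j := by omega
    rw [show min (r+1) j = r+1 by omega]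
    have hj0 : j ≠ 0 := by omega
    show pvBest pages (pvDpAt pages r) j = pvFlev pages (r+1) j
    unfold pvBest
    rw [pvFlev_succ pages r j hj0]
    apply PySem.List.foldl_congr_mem
    intro acc k hk
    have hkj : k < j := List.mem_range.mp hk
    unfold pvF pvDpAt
    rw [pv_map_getD _ k _ _ (by omega)]
    congr 2
    by_cases hkr : k ≤ r
    · rw [show min r k = k by omega, pvFlev_stab pages r k hkr]
    · rw [show min r k = r by omega]

lemma pv_A_fold (pages : List Int) :
    ∀ (d r : Nat),
    (PySem.List.pyRange ((r:Int)+1) ((r:Int)+1+(d:Int)) 1).foldl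
      (pvA_step pages (pvA_pagesSum pages)) (pvDpAt pages r) = pvDpAt pages (r+d) := by
  intro d
  induction d with
  | zero =>
    intro r
    rw [PySem.List.pyRange_one_eq_nil (by omega)]
    rfl
  | succ d ih =>
    intro r
    rw [PySem.List.pyRange_one_cons (by omega)]
    simp only [List.foldl_cons]
    rw [pv_A_char pages _ ((r:Int)+1) (by omega), pv_step_dpAt pages r]
    have := ih (r+1)
    rw [show (((r+1:Nat)):Int) = (r:Int)+1 by push_cast; ring] at this
    rw [show (r:Int)+1+((d+1:Nat):Int) = ((r:Int)+1)+1+(d:Int) by push_cast; ring]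
    rw [this, show r + (d+1) = (r+1) + d by omega]

lemma pv_A_value (pages : List Int) (m : Int) :
    copyBooks_TLE pages m = pvFlev pages (min (m-1).toNat pages.length) pages.length := by
  unfold copyBooks_TLE
  have hfold : (PySem.List.pyRange 1 m 1).foldl (pvA_step pages (pvA_pagesSum pages)) (pvA_dpInit pages)
      = pvDpAt pages (m-1).toNat := by
    rw [pv_dpInit_eq]
    by_cases hm : m ≤ 1
    · rw [PySem.List.pyRange_one_eq_nil hm, show (m-1).toNat = 0 by omega]
      rfl
    · have := pv_A_fold pages (m-1).toNat 0
      simp only [Nat.cast_zero, zero_add] at this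
      rw [show (((m-1).toNat : Nat):Int) = m - 1 by omega] at this
      rw [show (1:Int) + (m-1) = m by ring] at this
      exact this
  rw [hfold]
  have hne : pvDpAt pages (m-1).toNat ≠ [] := by
    unfold pvDpAt
    simp
  rw [PySem.List.pyGetD_neg_one _ 0 hne]
  unfold pvDpAt
  rw [List.getLast_eq_getElem]
  simp

-- ===== B side =====

lemma pv_Bpre_aux (xs : List Int) (x : Int) :
    pvS (xs ++ [x]) (xs.length + 1) = pvS xs xs.length + x := by
  unfold pvS
  rw [List.take_of_length_le (by simp), List.take_of_length_le (by omega)]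
  simp

lemma pv_Bpre_aux2 (xs : List Int) (x : Int) (t : Nat) (ht : t ≤ xs.length) :
    pvS (xs ++ [x]) t = pvS xs t := by
  unfold pvS
  rw [List.take_append_of_le_length ht]

lemma pv_Bpre_eq (pages : List Int) :
    pvBpre pages = (List.range (pages.length + 1)).map (fun t => pvS pages t) := by
  unfold pvBpre
  induction pages using List.reverseRecOn with
  | nil => simp [pvS]
  | append_singleton xs x ih =>
    rw [List.foldl_append, ih]
    simp only [List.foldl_cons, List.foldl_nil]
    have hne : (List.range (xs.length + 1)).map (fun t => pvS xs t) ≠ [] := by simp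
    rw [PySem.List.pyGetD_neg_one _ 0 hne]
    rw [List.getLast_eq_getElem]
    simp only [List.length_map, List.length_range, List.getElem_map, List.getElem_range]
    rw [List.length_append, List.length_cons, List.length_nil]
    rw [List.range_succ (n := xs.length + 1), List.map_append]
    congr 1
    · apply List.map_congr_left
      intro t ht
      have htl := List.mem_range.mp ht
      exact (pv_Bpre_aux2 xs x t (by omega : t ≤ xs.length)).symm
    · simp only [List.map_cons, List.map_nil]
      congr 1
      rw [show xs.length + 1 - 1 = xs.length by omega]
      rw [pv_Bpre_aux xs x]

-- memo invariant: every stored value is the corresponding pvFlev value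
def pvMemoOK (pages : List Int) (memo : PySem.Dict (Int × Int) Int) : Prop :=
  ∀ i j v, memo.get? (i, j) = some v → 0 ≤ j ∧ v = pvFlev pages (i-1).toNat j.toNat

lemma pv_B_loop (pages pre : List Int)
    (Hpre : pre = (List.range (pages.length + 1)).map (fun t => pvS pages t))
    (N : Nat)
    (IH : ∀ i j memo, i.toNat ≤ N → 0 ≤ j → j ≤ (pages.length:Int) → pvMemoOK pages memo →
      (pvBbest pre i j memo).1 = pvFlev pages (i-1).toNat j.toNat ∧
      pvMemoOK pages (pvBbest pre i j memo).2) :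
    ∀ (ks : List Int) (ip j val : Int) (memo : PySem.Dict (Int × Int) Int),
      ip.toNat ≤ N → 0 ≤ j → j ≤ (pages.length:Int) →
      (∀ k ∈ ks, 0 ≤ k ∧ k ≤ (pages.length:Int)) → pvMemoOK pages memo →
      (pvBloop pre ip j ks val memo).1
        = ks.foldl (fun v k => min v (max (pvFlev pages (ip-1).toNat k.toNat)
            (pvS pages j.toNat - pvS pages k.toNat))) val ∧
      pvMemoOK pages (pvBloop pre ip j ks val memo).2 := by
  intro ks
  induction ks with
  | nil =>
    intro ip j val memo _ _ _ _ hmem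
    have hun : pvBloop pre ip j [] val memo = (val, memo) := by
      conv_lhs => unfold pvBloop
    rw [hun]
    exact ⟨rfl, hmem⟩
  | cons k ks' ih =>
    intro ip j val memo hip hj0 hjn hks hmem
    have hk := hks k List.mem_cons_self
    have hbest := IH ip k memo hip hk.1 hk.2 hmem
    have hun : pvBloop pre ip j (k :: ks') val memo
        = pvBloop pre ip j ks'
            (min val (max (pvBbest pre ip k memo).1
              (PySem.List.pyGetD pre j 0 - PySem.List.pyGetD pre k 0)))
            (pvBbest pre ip k memo).2 := by
      conv_lhs => unfold pvBloop
    rw [hun]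
    simp only [List.foldl_cons]
    have hprej : PySem.List.pyGetD pre j 0 = pvS pages j.toNat := by
      rw [Hpre, show j = ((j.toNat:Nat):Int) by omega, PySem.List.pyGetD_natCast]
      rw [pv_map_getD _ _ _ _ (by omega)]
      simp only [Int.toNat_natCast]
    have hprek : PySem.List.pyGetD pre k 0 = pvS pages k.toNat := by
      rw [Hpre, show k = ((k.toNat:Nat):Int) by omega, PySem.List.pyGetD_natCast]
      rw [pv_map_getD _ _ _ _ (by omega)]
      simp only [Int.toNat_natCast]
    rw [hprej, hprek, hbest.1]
    exact ih ip j (min val (max (pvFlev pages (ip-1).toNat k.toNat)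
        (pvS pages j.toNat - pvS pages k.toNat))) (pvBbest pre ip k memo).2
      hip hj0 hjn (fun x hx => hks x (List.mem_cons_of_mem k hx)) hbest.2

lemma pv_B_best (pages pre : List Int)
    (Hpre : pre = (List.range (pages.length + 1)).map (fun t => pvS pages t)) :
    ∀ (N : Nat) (i j : Int) (memo : PySem.Dict (Int × Int) Int),
      i.toNat ≤ N → 0 ≤ j → j ≤ (pages.length:Int) → pvMemoOK pages memo →
      (pvBbest pre i j memo).1 = pvFlev pages (i-1).toNat j.toNat ∧
      pvMemoOK pages (pvBbest pre i j memo).2 := by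
  have hbaseval : ∀ (i j : Int), 0 ≤ j → j ≤ (pages.length:Int) → (i ≤ 1 ∨ j = 0) →
      PySem.List.pyGetD pre j 0 = pvFlev pages (i-1).toNat j.toNat := by
    intro i j hj0 hjn hbase
    have hj : PySem.List.pyGetD pre j 0 = pvS pages j.toNat := by
      rw [Hpre, show j = ((j.toNat:Nat):Int) by omega, PySem.List.pyGetD_natCast]
      rw [pv_map_getD _ _ _ _ (by omega)]
      simp only [Int.toNat_natCast]
    rw [hj]
    rcases hbase with h | h
    · rw [show (i-1).toNat = 0 by omega]; rfl
    · rw [show j.toNat = 0 by omega, pvFlev_zero_books]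
      simp [pvS]
  intro N
  induction N with
  | zero =>
    intro i j memo hiN hj0 hjn hmem
    have hi1 : i ≤ 1 := by omega
    have hun : pvBbest pre i j memo = (PySem.List.pyGetD pre j 0, memo) := by
      unfold pvBbest
      rw [dif_pos (Or.inl hi1)]
    rw [hun]
    exact ⟨hbaseval i j hj0 hjn (Or.inl hi1), hmem⟩
  | succ N ihN =>
    intro i j memo hiN hj0 hjn hmem
    by_cases hbase : i ≤ 1 ∨ j = 0
    · have hun : pvBbest pre i j memo = (PySem.List.pyGetD pre j 0, memo) := by
        unfold pvBbest
        rw [dif_pos hbase]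
      rw [hun]
      exact ⟨hbaseval i j hj0 hjn hbase, hmem⟩
    · have hi2 : 2 ≤ i := by omega
      by_cases hcont : PySem.Dict.contains memo (i, j) = true
      · have hun : pvBbest pre i j memo = (PySem.Dict.getD memo (i, j) 0, memo) := by
          unfold pvBbest
          rw [dif_neg hbase, if_pos hcont]
        rw [hun]
        refine ⟨?_, hmem⟩
        show PySem.Dict.getD memo (i, j) 0 = _
        have hsome : (memo.get? (i, j)).isSome := by
          rw [← PySem.Dict.contains_eq_isSome_get?]; exact hcont
        obtain ⟨v, hv⟩ := Option.isSome_iff_exists.mp hsome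
        rw [PySem.Dict.getD_eq_get?_getD, hv]
        exact (hmem i j v hv).2
      · have hun : pvBbest pre i j memo
            = ((pvBloop pre (i-1) j (PySem.List.pyRange 0 j 1) (2^31) memo).1,
               PySem.Dict.insert (pvBloop pre (i-1) j (PySem.List.pyRange 0 j 1) (2^31) memo).2
                 (i, j) (pvBloop pre (i-1) j (PySem.List.pyRange 0 j 1) (2^31) memo).1) := by
          unfold pvBbest
          rw [dif_neg hbase, if_neg hcont]
        rw [hun]
        have hloop := pv_B_loop pages pre Hpre N
          (fun i' j' memo' hi' h0 hn hm => ihN i' j' memo' hi' h0 hn hm)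
          (PySem.List.pyRange 0 j 1) (i-1) j (2^31) memo
          (by omega) hj0 hjn
          (by
            intro k hk
            have := PySem.List.mem_pyRange_one.mp hk
            omega)
          hmem
        have hval : (pvBloop pre (i-1) j (PySem.List.pyRange 0 j 1) (2^31) memo).1
            = pvFlev pages (i-1).toNat j.toNat := by
          rw [hloop.1]
          have hjcast : j = ((j.toNat:Nat):Int) := by omega
          conv_lhs => rw [hjcast]
          rw [PySem.List.pyRange_zero_nat, List.foldl_map]
          have hs : (i-1).toNat = (i-1-1).toNat + 1 := by omega
          rw [hs, pvFlev_succ pages (i-1-1).toNat j.toNat (by omega)]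
          apply PySem.List.foldl_congr_mem
          intro acc k _
          simp only [Int.toNat_natCast]
        constructor
        · exact hval
        · intro i' j' v hv
          simp only [] at hv
          rw [PySem.Dict.get?_insert] at hv
          by_cases heq : ((i', j') : Int × Int) = (i, j)
          · rw [if_pos heq] at hv
            rw [Prod.mk.injEq] at heq
            obtain ⟨hi', hj'⟩ := heq
            subst hi'; subst hj'
            injection hv with hv
            exact ⟨hj0, by rw [← hv, hval]⟩
          · rw [if_neg heq] at hv
            exact hloop.2 i' j' v hv

lemma pv_B_value (pages : List Int) (m : Int) :
    copyBooks_TLE_alt pages m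
      = pvFlev pages (min m ((pages.length:Int)+1) - 1).toNat pages.length := by
  unfold copyBooks_TLE_alt
  simp only [PySem.List.len_eq]
  have hmem : pvMemoOK pages PySem.Dict.empty := by
    intro i j v hv
    rw [PySem.Dict.get?_empty] at hv
    exact absurd hv (by simp)
  have := pv_B_best pages (pvBpre pages) (pv_Bpre_eq pages)
    (min m ((pages.length:Int)+1)).toNat (min m ((pages.length:Int)+1)) (pages.length:Int)
    PySem.Dict.empty (le_refl _) (by omega) (by omega) hmem
  rw [this.1]
  rw [show ((pages.length:Int)).toNat = pages.length by omega]

-- ===== VERDICT (by name: the statement is the Claim_ definition above) =====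
theorem copyBooks_TLE_spec : Claim_equal_copyBooks_TLE := by
  intro pages m _
  unfold Spec_copyBooks_TLE
  rw [pv_A_value, pv_B_value]
  congr 1
  omega
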